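-- pv_equiv track=rewrite | github.com/FilipLe/DailyInterviewPro-Unsolved | Remove Character to Create Palindrome (SOLVED)/removeCharCreatePalindrome.py | create_palindrome
-- ===== SOURCE A (Python) =====
-- def create_palindrome(s):
--     count = 0
--     # iterate through every char of the string
--     while count < len(s):
--         # if the string after removing curr char is palindrome, it works
--
--         #checking first char
--         if count == 0:
--             copy = s[count+1:]
--             if checkPalindrome(copy) == True:
--                 return True
--
--         #checking last char
--         elif count == len(s) - 1:
--             copy = s[:count]
--             if checkPalindrome(copy) == True:
--                 return True
--
--         #checking char in the middle
--         else:
--             copy = s[:count] + s[count+1:]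
--             if checkPalindrome(copy) == True:
--                 return True
--
--         count += 1
--     return False
--
-- def checkPalindrome(s):
--     # base case
--     if s == '' or len(s) == 1:
--         return True
--
--     # recursive case
--     else:
--         #call function recursively on input string without 1st and last char
--         checkRest = checkPalindrome(s[1:-1])
--         if s[0] == s[-1]:
--             return True and checkRest
--         else:
--             return False and checkRest
-- ===== SOURCE B (Python) =====
-- def create_palindrome(s):
--     # Two-pointer: walk inward from both ends; on the first mismatch the only
--     # candidates are deleting the left or the right mismatching char.
--     if not s:
--         return False
--     i, j = 0, len(s) - 1
--     while i < j:
--         if s[i] != s[j]: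
--             return _is_pal_range(s, i + 1, j) or _is_pal_range(s, i, j - 1)
--         i += 1
--         j -= 1
--     return True
--
-- def _is_pal_range(s, i, j):
--     while i < j:
--         if s[i] != s[j]:
--             return False
--         i += 1
--         j -= 1
--     return True
-- ===== Notes on version B (the rewrite author's own statement) =====
-- stated objective: faster
-- what changed: Replaces the try-every-deletion scan (each deletion checked by a recursive slicing palindrome test) with the classic two-pointer walk that, at the first mismatch, only tests skipping the left or the right mismatching character.
import Mathlib
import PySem

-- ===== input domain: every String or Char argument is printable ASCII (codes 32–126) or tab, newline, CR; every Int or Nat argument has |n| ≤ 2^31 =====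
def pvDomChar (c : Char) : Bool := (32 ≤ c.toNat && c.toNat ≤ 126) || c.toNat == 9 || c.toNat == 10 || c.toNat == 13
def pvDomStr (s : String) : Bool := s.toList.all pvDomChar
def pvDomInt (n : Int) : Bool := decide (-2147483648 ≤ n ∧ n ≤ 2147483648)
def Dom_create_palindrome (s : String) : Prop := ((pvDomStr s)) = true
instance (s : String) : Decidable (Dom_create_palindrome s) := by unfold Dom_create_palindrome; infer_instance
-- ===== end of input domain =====

-- B replaces A's try-every-deletion scan (each deletion re-checked by a recursive slicing
-- palindrome test) with the two-pointer walk that on the first mismatch tests only skipping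
-- the left or the right mismatching character (objective: faster).

-- ===== PORT A =====
-- helper checkPalindrome(s), transliterated on the char list of its string argument
def checkPalindrome (s : List Char) : Bool :=
  if s = [] ∨ s.length = 1 then true
  else
    -- checkRest = checkPalindrome(s[1:-1])
    let checkRest := checkPalindrome (PySem.List.slice s (some 1) (some (-1)))
    if PySem.List.pyGetD s 0 ' ' = PySem.List.pyGetD s (-1) ' ' then true && checkRest
    else false && checkRest
termination_by s.length
decreasing_by
  rename_i h
  have h2 : 2 ≤ s.length := by
    rcases s with _ | ⟨a, _ | ⟨b, t⟩⟩ <;> simp_all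
  rw [PySem.List.length_slice, PySem.List.clampIdx_neg_one]
  have : PySem.List.clampIdx s.length 1 = 1 := by simp [pysem]; omega
  omega

-- the 'while count < len(s)' loop of create_palindrome
def aLoop (s : List Char) (count : Nat) : Bool :=
  if count < s.length then
    if count = 0 then
      -- copy = s[count+1:]
      if checkPalindrome (PySem.List.slice s (some ((count : Int) + 1)) none) = true then true
      else aLoop s (count + 1)
    else if count = s.length - 1 then
      -- copy = s[:count]
      if checkPalindrome (PySem.List.slice s none (some (count : Int))) = true then true
      else aLoop s (count + 1)
    else
      -- copy = s[:count] + s[count+1:]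
      if checkPalindrome (PySem.List.slice s none (some (count : Int)) ++
          PySem.List.slice s (some ((count : Int) + 1)) none) = true then true
      else aLoop s (count + 1)
  else false
termination_by s.length - count

def create_palindrome (s : String) : Bool := aLoop s.toList 0

-- ===== PORT B =====
-- helper _is_pal_range(s, i, j): indices stay in range, so Nat indexing with a default is exact
def isPalRange (l : List Char) (i j : Nat) : Bool :=
  if i < j then
    if l.getD i ' ' ≠ l.getD j ' ' then false
    else isPalRange l (i + 1) (j - 1)
  else true
termination_by j - i

-- the main two-pointer loop of B
def bLoop (l : List Char) (i j : Nat) : Bool :=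
  if i < j then
    if l.getD i ' ' ≠ l.getD j ' ' then isPalRange l (i + 1) j || isPalRange l i (j - 1)
    else bLoop l (i + 1) (j - 1)
  else true
termination_by j - i

def create_palindrome_alt (s : String) : Bool :=
  if s.toList = [] then false
  else bLoop s.toList 0 (s.toList.length - 1)

-- ===== PRECONDITION & SPEC =====
def Spec_create_palindrome (s : String) (out : Bool) : Prop := out = create_palindrome_alt s
instance (s : String) (out : Bool) : Decidable (Spec_create_palindrome s out) := by unfold Spec_create_palindrome; infer_instance

-- ===== CLAIM (what is proved, stated in full; the proofs are below) =====
def Claim_equal_create_palindrome : Prop := ∀ (s : String), Dom_create_palindrome s → Spec_create_palindrome s (create_palindrome s)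

-- ===== LEMMAS AND PROOFS =====

-- the segment s[i..j] (inclusive) that the two-pointer loops inspect
def seg (l : List Char) (i j : Nat) : List Char := (l.drop i).take (j + 1 - i)

-- structural (list-level) form of B's main loop, used only in the proof
def goB : List Char → Bool
  | [] => true
  | [_] => true
  | a :: b :: t =>
    if a = (b :: t).getLast (by simp) then goB ((b :: t).dropLast)
    else decide ((b :: t) = (b :: t).reverse) ||
         decide ((a :: (b :: t).dropLast) = (a :: (b :: t).dropLast).reverse)
termination_by l => l.length
decreasing_by simp

-- every list of length ≥ 2 is a :: m ++ [b]
lemma wrap_decomp (l : List Char) (h : 2 ≤ l.length) : ∃ a m b, l = a :: m ++ [b] := by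
  rcases l with _ | ⟨a, t⟩
  · simp at h
  · have ht : t ≠ [] := by rintro rfl; simp at h
    exact ⟨a, t.dropLast, t.getLast ht, by simp [List.dropLast_concat_getLast ht]⟩

lemma pal_wrap (a b : Char) (m : List Char) :
    (a :: m ++ [b] = (a :: m ++ [b]).reverse) ↔ (a = b ∧ m = m.reverse) := by
  constructor
  · intro h
    have h2 : a :: (m ++ [b]) = b :: (m.reverse ++ [a]) := by
      rw [← List.cons_append, h]
      simp
    rw [List.cons.injEq] at h2
    obtain ⟨hab, hm⟩ := h2
    subst hab
    exact ⟨rfl, (List.append_left_inj [a]).mp hm⟩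
  · rintro ⟨rfl, hm⟩
    have h3 : (a :: m ++ [a]).reverse = a :: m.reverse ++ [a] := by simp
    rw [h3, ← hm]

lemma eraseIdx_append_singleton (m : List Char) (b : Char) (j : Nat) (hj : j < m.length) :
    (m ++ [b]).eraseIdx j = m.eraseIdx j ++ [b] := by
  rw [List.eraseIdx_eq_take_drop_succ, List.eraseIdx_eq_take_drop_succ]
  rw [List.take_append_of_le_length (by omega), List.drop_append_of_le_length (by omega)]
  simp

lemma eraseIdx_append_length (m : List Char) (b : Char) : (m ++ [b]).eraseIdx m.length = m := by
  rw [List.eraseIdx_eq_take_drop_succ]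
  simp

-- case split of "some one-char deletion of a :: m ++ [b] satisfies p"
lemma exists_erase_wrap (p : List Char → Prop) (a b : Char) (m : List Char) :
    (∃ i < (a :: m ++ [b]).length, p ((a :: m ++ [b]).eraseIdx i)) ↔
      (p (m ++ [b]) ∨ p (a :: m) ∨ ∃ j < m.length, p (a :: m.eraseIdx j ++ [b])) := by
  have hlen : (a :: m ++ [b]).length = m.length + 2 := by simp
  constructor
  · rintro ⟨i, hi, hp⟩
    rw [hlen] at hi
    rcases i with _ | j
    · left; simpa using hp
    · have he : (a :: m ++ [b]).eraseIdx (j + 1) = a :: (m ++ [b]).eraseIdx j := by simp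
      by_cases hjm : j < m.length
      · right; right
        refine ⟨j, hjm, ?_⟩
        rw [he, eraseIdx_append_singleton m b j hjm] at hp
        simpa using hp
      · have hjm' : j = m.length := by omega
        subst hjm'
        right; left
        rw [he, eraseIdx_append_length] at hp
        exact hp
  · rintro (hp | hp | ⟨j, hj, hp⟩)
    · exact ⟨0, by simp, by simpa using hp⟩
    · refine ⟨m.length + 1, by rw [hlen]; omega, ?_⟩
      have he : (a :: m ++ [b]).eraseIdx (m.length + 1) = a :: (m ++ [b]).eraseIdx m.length := by simp
      rw [he, eraseIdx_append_length]
      exact hp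
    · refine ⟨j + 1, by rw [hlen]; omega, ?_⟩
      have he : (a :: m ++ [b]).eraseIdx (j + 1) = a :: (m ++ [b]).eraseIdx j := by simp
      rw [he, eraseIdx_append_singleton m b j hj]
      simpa using hp

lemma pal_del_of_pal (l : List Char) (h : l ≠ []) (hp : l = l.reverse) :
    ∃ i < l.length, l.eraseIdx i = (l.eraseIdx i).reverse := by
  obtain ⟨n, hn⟩ : ∃ n, l.length = n := ⟨_, rfl⟩
  induction n using Nat.strong_induction_on generalizing l with
  | _ n IH =>
  rcases Nat.lt_or_ge l.length 2 with h2 | h2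
  · rcases l with _ | ⟨a, _ | ⟨c, t⟩⟩
    · exact absurd rfl h
    · exact ⟨0, by simp, by simp⟩
    · simp at h2
  · obtain ⟨a, m, b, rfl⟩ := wrap_decomp l h2
    obtain ⟨hab, hm⟩ := (pal_wrap a b m).mp hp
    subst hab
    rcases m with _ | ⟨c, m'⟩
    · exact ⟨0, by simp, by simp⟩
    · obtain ⟨j, hj, hpj⟩ := IH (c :: m').length (by simp at hn ⊢; omega) (c :: m')
        (by simp) hm rfl
      refine ⟨j + 1, by simp at hj ⊢; omega, ?_⟩
      have he : (a :: (c :: m') ++ [a]).eraseIdx (j + 1) = a :: (c :: m').eraseIdx j ++ [a] := by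
        rw [List.cons_append, List.eraseIdx_cons_succ, eraseIdx_append_singleton (c :: m') a j hj, List.cons_append]
      rw [he]
      exact (pal_wrap a a ((c :: m').eraseIdx j)).mpr ⟨rfl, hpj⟩

lemma slice_one_neg_one (l : List Char) :
    PySem.List.slice l (some 1) (some (-1)) = l.tail.dropLast := by
  rcases l with _ | ⟨a, t⟩
  · rfl
  · rw [PySem.List.slice, PySem.List.clampIdx_neg_one]
    have h1 : PySem.List.clampIdx (a :: t).length 1 = 1 := by simp [pysem]
    rw [h1]
    simp [List.dropLast_eq_take]

lemma checkPalindrome_iff (l : List Char) : checkPalindrome l = true ↔ l = l.reverse := by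
  obtain ⟨n, hn⟩ : ∃ n, l.length = n := ⟨_, rfl⟩
  induction n using Nat.strong_induction_on generalizing l with
  | _ n IH =>
  rw [checkPalindrome]
  by_cases hb : l = [] ∨ l.length = 1
  · rw [if_pos hb]
    rcases hb with rfl | h1
    · simp
    · rcases l with _ | ⟨a, _ | ⟨c, t⟩⟩ <;> simp_all
  · rw [if_neg hb]
    have h2 : 2 ≤ l.length := by
      rcases l with _ | ⟨a, _ | ⟨c, t⟩⟩ <;> simp_all
      omega
    obtain ⟨a, m, b, rfl⟩ := wrap_decomp l h2
    rw [slice_one_neg_one]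
    have hmid : (a :: m ++ [b]).tail.dropLast = m := by simp
    rw [hmid]
    have ha : PySem.List.pyGetD (a :: m ++ [b]) 0 ' ' = a := by simp [pysem]
    have hb' : PySem.List.pyGetD (a :: m ++ [b]) (-1) ' ' = b :=
      PySem.List.pyGetD_neg_one_append_singleton (a :: m) b ' '
    rw [ha, hb']
    have hIH := IH m.length (by simp at hn ⊢; omega) m rfl
    rw [pal_wrap]
    by_cases hab : a = b
    · simp [hab, hIH]
    · simp [hab]

lemma aLoop_step (l : List Char) (c : Nat) (hc : c < l.length) (rest : Bool)
    (hrest : rest = true ↔ ∃ i, c + 1 ≤ i ∧ i < l.length ∧ l.eraseIdx i = (l.eraseIdx i).reverse) :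
    ((if checkPalindrome (l.eraseIdx c) = true then true else rest) = true ↔
      ∃ i, c ≤ i ∧ i < l.length ∧ l.eraseIdx i = (l.eraseIdx i).reverse) := by
  by_cases hp : checkPalindrome (l.eraseIdx c) = true
  · rw [if_pos hp]
    simp only [true_iff]
    exact ⟨c, by omega, hc, (checkPalindrome_iff _).mp hp⟩
  · rw [if_neg hp, hrest]
    constructor
    · rintro ⟨i, h1, h2, h3⟩
      exact ⟨i, by omega, h2, h3⟩
    · rintro ⟨i, h1, h2, h3⟩
      rcases Nat.eq_or_lt_of_le h1 with rfl | hlt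
      · exact absurd ((checkPalindrome_iff _).mpr h3) hp
      · exact ⟨i, by omega, h2, h3⟩

lemma aLoop_iff (l : List Char) (c : Nat) :
    aLoop l c = true ↔ ∃ i, c ≤ i ∧ i < l.length ∧ l.eraseIdx i = (l.eraseIdx i).reverse := by
  obtain ⟨n, hn⟩ : ∃ n, l.length - c = n := ⟨_, rfl⟩
  induction n using Nat.strong_induction_on generalizing c with
  | _ n IH =>
  rw [aLoop]
  by_cases hc : c < l.length
  · rw [if_pos hc]
    have hIH := IH (l.length - (c + 1)) (by omega) (c + 1) rfl
    by_cases hc0 : c = 0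
    · subst hc0
      rw [if_pos rfl]
      have hcopy : PySem.List.slice l (some (((0 : Nat) : Int) + 1)) none = l.eraseIdx 0 := by
        have h1 : (((0 : Nat) : Int) + 1) = ((1 : Nat) : Int) := by norm_num
        rw [h1, PySem.List.slice_from_natCast, List.eraseIdx_eq_take_drop_succ]
        simp
      rw [hcopy]
      exact aLoop_step l 0 hc _ hIH
    · rw [if_neg hc0]
      by_cases hcl : c = l.length - 1
      · rw [if_pos hcl]
        have hcopy : PySem.List.slice l none (some (c : Int)) = l.eraseIdx c := by
          rw [PySem.List.slice_to_natCast, List.eraseIdx_eq_take_drop_succ]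
          have hd : l.drop (c + 1) = [] := List.drop_eq_nil_of_le (by omega)
          rw [hd, List.append_nil]
        rw [hcopy]
        exact aLoop_step l c hc _ hIH
      · rw [if_neg hcl]
        have hcopy : PySem.List.slice l none (some (c : Int)) ++
            PySem.List.slice l (some ((c : Int) + 1)) none = l.eraseIdx c := by
          rw [PySem.List.slice_to_natCast]
          have h1 : ((c : Int) + 1) = (((c + 1 : Nat)) : Int) := by push_cast; ring
          rw [h1, PySem.List.slice_from_natCast, List.eraseIdx_eq_take_drop_succ]
        rw [hcopy]
        exact aLoop_step l c hc _ hIH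
  · rw [if_neg hc]
    simp only [Bool.false_eq_true, false_iff]
    rintro ⟨i, h1, h2, _⟩
    omega

lemma seg_cons (l : List Char) (i j : Nat) (hij : i ≤ j) (hi : i < l.length) :
    seg l i j = l.getD i ' ' :: seg l (i + 1) j := by
  unfold seg
  rw [List.drop_eq_getElem_cons hi]
  have h2 : j + 1 - i = (j - i) + 1 := by omega
  have h3 : j + 1 - (i + 1) = j - i := by omega
  rw [h2, h3, List.take_succ_cons, List.getD_eq_getElem l ' ' hi]

lemma seg_snoc (l : List Char) (i j : Nat) (h1 : 1 ≤ j) (hij : i ≤ j) (hj : j < l.length) :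
    seg l i j = seg l i (j - 1) ++ [l.getD j ' '] := by
  unfold seg
  have h2 : j + 1 - i = (j - i) + 1 := by omega
  have h3 : (j - 1) + 1 - i = j - i := by omega
  rw [h2, h3, List.take_add_one]
  congr 1
  rw [List.getElem?_drop]
  have h4 : i + (j - i) = j := by omega
  rw [h4, List.getElem?_eq_getElem hj]
  simp [List.getD_eq_getElem?_getD, List.getElem?_eq_getElem hj]

-- pal_wrap with the argument written cons-outside (the simp-normal shape)
lemma pal_wrap' (a b : Char) (m : List Char) :
    (a :: (m ++ [b]) = (a :: (m ++ [b])).reverse) ↔ (a = b ∧ m = m.reverse) := pal_wrap a b m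

lemma pal_short (l : List Char) (h : l.length ≤ 1) : l = l.reverse := by
  rcases l with _ | ⟨a, _ | ⟨c, t⟩⟩ <;> simp_all

lemma seg_short (l : List Char) (i j : Nat) (h : ¬ i < j) : (seg l i j).length ≤ 1 := by
  unfold seg
  simp only [List.length_take]
  omega

lemma isPalRange_iff (l : List Char) (i j : Nat) (hj : j < l.length) :
    isPalRange l i j = true ↔ seg l i j = (seg l i j).reverse := by
  suffices H : ∀ n i j, j - i = n → j < l.length →
      (isPalRange l i j = true ↔ seg l i j = (seg l i j).reverse) from H _ i j rfl hj
  intro n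
  induction n using Nat.strong_induction_on with
  | _ n IH =>
  intro i j hn hj
  rw [isPalRange]
  by_cases hij : i < j
  · rw [if_pos hij]
    have hdecomp : seg l i j = l.getD i ' ' :: (seg l (i + 1) (j - 1) ++ [l.getD j ' ']) := by
      rw [seg_cons l i j (by omega) (by omega), seg_snoc l (i + 1) j (by omega) (by omega) hj]
    rw [hdecomp, pal_wrap']
    by_cases heq : l.getD i ' ' = l.getD j ' '
    · rw [if_neg (not_not_intro heq), IH (j - 1 - (i + 1)) (by omega) (i + 1) (j - 1) rfl (by omega)]
      exact (and_iff_right heq).symm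
    · rw [if_pos heq]
      simp only [Bool.false_eq_true, false_iff]
      rintro ⟨h, -⟩
      exact heq h
  · rw [if_neg hij]
    simp only [true_iff]
    exact pal_short _ (seg_short l i j hij)

lemma goB_wrap (a b : Char) (m : List Char) :
    goB (a :: m ++ [b]) =
      if a = b then goB m
      else decide ((m ++ [b]) = (m ++ [b]).reverse) || decide ((a :: m) = (a :: m).reverse) := by
  rcases m with _ | ⟨c, m'⟩
  · simp [goB]
  · have h1 : (c :: (m' ++ [b])).dropLast = c :: m' := by
      rw [← List.cons_append, List.dropLast_concat]
    have h2 : (c :: (m' ++ [b])).getLast (by simp) = b := by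
      simp
    simp [goB, h1, h2]

lemma bLoop_eq_goB (l : List Char) (i j : Nat) (hj : j < l.length) :
    bLoop l i j = goB (seg l i j) := by
  suffices H : ∀ n i j, j - i = n → j < l.length → bLoop l i j = goB (seg l i j) from H _ i j rfl hj
  intro n
  induction n using Nat.strong_induction_on with
  | _ n IH =>
  intro i j hn hj
  rw [bLoop]
  by_cases hij : i < j
  · rw [if_pos hij]
    have hdecomp : seg l i j = (l.getD i ' ' :: seg l (i + 1) (j - 1)) ++ [l.getD j ' '] := by
      rw [seg_cons l i j (by omega) (by omega), seg_snoc l (i + 1) j (by omega) (by omega) hj]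
      simp
    rw [hdecomp, goB_wrap]
    by_cases heq : l.getD i ' ' = l.getD j ' '
    · rw [if_neg (not_not_intro heq), if_pos heq,
        IH (j - 1 - (i + 1)) (by omega) (i + 1) (j - 1) rfl (by omega)]
    · rw [if_pos heq, if_neg heq]
      have hs : seg l (i + 1) j = seg l (i + 1) (j - 1) ++ [l.getD j ' '] :=
        seg_snoc l (i + 1) j (by omega) (by omega) hj
      have hc : seg l i (j - 1) = l.getD i ' ' :: seg l (i + 1) (j - 1) :=
        seg_cons l i (j - 1) (by omega) (by omega)
      congr 1
      · rw [Bool.eq_iff_iff, decide_eq_true_eq, ← hs]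
        exact isPalRange_iff l (i + 1) j hj
      · rw [Bool.eq_iff_iff, decide_eq_true_eq, ← hc]
        exact isPalRange_iff l i (j - 1) (by omega)
  · rw [if_neg hij]
    have hs := seg_short l i j hij
    rcases hq : seg l i j with _ | ⟨x, _ | ⟨y, t⟩⟩
    · simp [goB]
    · simp [goB]
    · rw [hq] at hs
      simp at hs

lemma goB_iff (l : List Char) :
    goB l = true ↔ (l = l.reverse ∨ ∃ i < l.length, l.eraseIdx i = (l.eraseIdx i).reverse) := by
  obtain ⟨n, hn⟩ : ∃ n, l.length = n := ⟨_, rfl⟩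
  induction n using Nat.strong_induction_on generalizing l with
  | _ n IH =>
  rcases Nat.lt_or_ge l.length 2 with h2 | h2
  · rcases l with _ | ⟨a, _ | ⟨c, t⟩⟩
    · simp [goB]
    · simp [goB]
    · simp at h2
  · obtain ⟨a, m, b, rfl⟩ := wrap_decomp l h2
    rw [goB_wrap, exists_erase_wrap (fun t => t = t.reverse) a b m, pal_wrap]
    by_cases hab : a = b
    · subst hab
      rw [if_pos rfl, IH m.length (by simp at hn ⊢; omega) m rfl]
      constructor
      · rintro (hm | ⟨j, hj, hpj⟩)
        · left; exact ⟨rfl, hm⟩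
        · right; right; right
          exact ⟨j, hj, (pal_wrap' a a _).mpr ⟨rfl, hpj⟩⟩
      · rintro (⟨-, hm⟩ | hp1 | hp2 | ⟨j, hj, hp3⟩)
        · left; exact hm
        · -- a deletion-palindrome of m from 'm ++ [a] is a palindrome'
          rcases m with _ | ⟨c, m'⟩
          · left; rfl
          · right
            obtain ⟨hca, hm'⟩ := (pal_wrap c a m').mp hp1
            exact ⟨0, by simp, by simpa using hm'⟩
        · -- from 'a :: m is a palindrome': delete m's last element
          rcases m with _ | ⟨c, m'⟩
          · left; rfl
          · right
            have hm0 : (c :: m') ≠ [] := by simp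
            obtain ⟨m0, g, hdec⟩ : ∃ m0 g, c :: m' = m0 ++ [g] :=
              ⟨_, _, (List.dropLast_concat_getLast hm0).symm⟩
            rw [hdec] at hp2
            obtain ⟨-, hm'⟩ := (pal_wrap' a _ _).mp hp2
            refine ⟨m0.length, by rw [hdec]; simp, ?_⟩
            rw [hdec, eraseIdx_append_length]
            exact hm'
        · right
          exact ⟨j, hj, ((pal_wrap' a a _).mp hp3).2⟩
    · rw [if_neg hab, Bool.or_eq_true, decide_eq_true_eq, decide_eq_true_eq]
      constructor
      · rintro (h1 | h1)
        · right; left; exact h1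
        · right; right; left; exact h1
      · rintro (⟨hab', -⟩ | h | h | ⟨j, hj, h⟩)
        · exact absurd hab' hab
        · left; exact h
        · right; exact h
        · exact absurd ((pal_wrap' a b _).mp h).1 hab

-- ===== VERDICT (by name: the statement is the Claim_ definition above) =====
theorem create_palindrome_spec : Claim_equal_create_palindrome := by
  intro s _
  unfold Spec_create_palindrome create_palindrome create_palindrome_alt
  by_cases hnil : s.toList = []
  · rw [if_pos hnil, hnil, aLoop]
    norm_num
  · rw [if_neg hnil]
    have hlen : 1 ≤ s.toList.length := by
      rcases h : s.toList with _ | _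
      · exact absurd h hnil
      · simp
    have hseg : seg s.toList 0 (s.toList.length - 1) = s.toList := by
      unfold seg
      rw [List.drop_zero, Nat.sub_zero, Nat.sub_add_cancel hlen, List.take_length]
    rw [Bool.eq_iff_iff, aLoop_iff, bLoop_eq_goB s.toList 0 (s.toList.length - 1) (by omega),
      hseg, goB_iff]
    constructor
    · rintro ⟨i, -, h2, h3⟩
      right
      exact ⟨i, h2, h3⟩
    · rintro (hp | ⟨i, h1, h2⟩)
      · obtain ⟨i, h1, h2⟩ := pal_del_of_pal s.toList hnil hp
        exact ⟨i, by omega, h1, h2⟩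
      · exact ⟨i, by omega, h1, h2⟩
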